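-- pv_equiv track=rewrite | github.com/ryan-a-bell/KeyFall | src/keyfall/notation.py | _pitch_to_staff_position
-- ===== SOURCE A (Python) =====
-- _DIATONIC_OFFSETS = {0: 0, 2: 1, 4: 2, 5: 3, 7: 4, 9: 5, 11: 6}
--
-- def _pitch_to_staff_position(pitch: int) -> int:
--     """Convert MIDI pitch to diatonic staff position relative to middle C (0).
--
--     Middle C = 0, D4 = 1, E4 = 2, ... B4 = 6, C5 = 7, etc.
--     B3 = -1, A3 = -2, etc.
--     """
--     octave = (pitch // 12) - 5  # octave relative to C4
--     note_in_octave = pitch % 12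
--     # Find nearest diatonic note
--     for midi_offset in (0, -1, 1):
--         adjusted = (note_in_octave + midi_offset) % 12
--         if adjusted in _DIATONIC_OFFSETS:
--             return octave * 7 + _DIATONIC_OFFSETS[adjusted]
--     return octave * 7
-- ===== SOURCE B (Python) =====
-- def _pitch_to_staff_position(pitch: int) -> int:
--     """Closed form: octave relative to C4 times 7 plus diatonic index of pitch % 12."""
--     return (pitch // 12 - 5) * 7 + (7 * (pitch % 12) + 1) // 12
-- ===== Notes on version B (the rewrite author's own statement) =====
-- stated objective: simpler
-- what changed: Replaced the dictionary lookup with a nearest-diatonic offset loop by a single closed-form arithmetic expression (7*(pitch%12)+1)//12.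
import Mathlib
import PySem

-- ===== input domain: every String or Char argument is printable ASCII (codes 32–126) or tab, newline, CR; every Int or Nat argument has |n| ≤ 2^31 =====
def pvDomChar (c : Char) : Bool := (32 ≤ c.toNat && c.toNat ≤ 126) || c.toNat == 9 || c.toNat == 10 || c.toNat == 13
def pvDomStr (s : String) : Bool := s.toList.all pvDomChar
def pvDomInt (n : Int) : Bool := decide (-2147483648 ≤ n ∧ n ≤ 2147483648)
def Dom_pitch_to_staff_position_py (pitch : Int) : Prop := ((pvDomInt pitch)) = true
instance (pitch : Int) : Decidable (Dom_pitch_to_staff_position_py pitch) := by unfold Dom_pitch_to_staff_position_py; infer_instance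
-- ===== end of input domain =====

-- B replaces A's offset loop and dictionary with one closed-form expression (objective: simpler).

-- ===== PORT A =====
-- _DIATONIC_OFFSETS = {0: 0, 2: 1, 4: 2, 5: 3, 7: 4, 9: 5, 11: 6}
def diatonicOffsets : PySem.Dict Int Int :=
  (((((((PySem.Dict.empty.insert 0 0).insert 2 1).insert 4 2).insert 5 3).insert 7 4).insert 9 5).insert 11 6)

-- the 'for midi_offset in (0, -1, 1)' loop with its early return; falls through to octave*7
def pitchLoopA (octave note_in_octave : Int) : List Int → Int
  | [] => octave * 7
  | midi_offset :: rest =>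
    let adjusted := PySem.Int.mod (note_in_octave + midi_offset) 12
    match diatonicOffsets.get? adjusted with
    | some v => octave * 7 + v
    | none => pitchLoopA octave note_in_octave rest

def pitch_to_staff_position_py (pitch : Int) : Int :=
  let octave := PySem.Int.floordiv pitch 12 - 5
  let note_in_octave := PySem.Int.mod pitch 12
  pitchLoopA octave note_in_octave [0, -1, 1]

-- ===== PORT B =====
def pitch_to_staff_position_py_alt (pitch : Int) : Int :=
  (PySem.Int.floordiv pitch 12 - 5) * 7 + PySem.Int.floordiv (7 * PySem.Int.mod pitch 12 + 1) 12

-- ===== PRECONDITION & SPEC =====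
def Spec_pitch_to_staff_position_py (pitch : Int) (out : Int) : Prop := out = pitch_to_staff_position_py_alt pitch
instance (pitch : Int) (out : Int) : Decidable (Spec_pitch_to_staff_position_py pitch out) := by unfold Spec_pitch_to_staff_position_py; infer_instance

-- ===== CLAIM (what is proved, stated in full; the proofs are below) =====
def Claim_equal_pitch_to_staff_position_py : Prop := ∀ (pitch : Int), Dom_pitch_to_staff_position_py pitch → Spec_pitch_to_staff_position_py pitch (pitch_to_staff_position_py pitch)

-- ===== LEMMAS AND PROOFS =====

-- both results depend on pitch only through its floor-quotient and residue mod 12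
lemma agree_on_residue (octave r : Int) (h0 : 0 ≤ r) (h12 : r < 12) :
    pitchLoopA octave r [0, -1, 1] = octave * 7 + PySem.Int.floordiv (7 * r + 1) 12 := by
  interval_cases r <;> simp [pitchLoopA, diatonicOffsets, PySem.Int.mod, PySem.Int.floordiv, PySem.Dict.get?, PySem.Dict.insert, PySem.Dict.empty]

-- ===== VERDICT (by name: the statement is the Claim_ definition above) =====
theorem pitch_to_staff_position_py_spec : Claim_equal_pitch_to_staff_position_py := by
  intro pitch _
  unfold Spec_pitch_to_staff_position_py pitch_to_staff_position_py pitch_to_staff_position_py_alt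
  exact agree_on_residue _ _ (PySem.Int.mod_nonneg pitch (by norm_num)) (PySem.Int.mod_lt pitch (by norm_num))
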